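-- pv_equiv track=rewrite | github.com/AlexanderBedrosyan/training_camp | dani_homework/dictionaries/d_part2/3_restaurant_orders.py | calculate_order
-- ===== SOURCE A (Python) =====
-- def calculate_order(menu, orders):
--     table_totals = {}
--     grand_total = 0
--
--     for table, items in orders.items():
--         total = 0
--         for item, qty in items.items():
--             if item in menu:  # ако го има в менюто
--                 total += menu[item] * qty
--         table_totals[table] = total
--         grand_total += total
--
--     return table_totals, grand_total
-- ===== SOURCE B (Python) =====
-- def calculate_order(menu, orders):
--     table_totals = {}
--     for table, items in orders.items():
--         # inverted traversal: walk the MENU and look each dish up in the table's order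
--         table_totals[table] = sum(price * items.get(item, 0) for item, price in menu.items())
--     return table_totals, sum(table_totals.values())
-- ===== Notes on version B (the rewrite author's own statement) =====
-- stated objective: alternative
-- what changed: The inner loop is inverted: instead of iterating each table's ordered items and testing membership in the menu, B iterates the menu and looks up each dish's quantity in the table's order with items.get(item, 0); the grand total is a separate reduction over the aggregated per-table totals.
import Mathlib
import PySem

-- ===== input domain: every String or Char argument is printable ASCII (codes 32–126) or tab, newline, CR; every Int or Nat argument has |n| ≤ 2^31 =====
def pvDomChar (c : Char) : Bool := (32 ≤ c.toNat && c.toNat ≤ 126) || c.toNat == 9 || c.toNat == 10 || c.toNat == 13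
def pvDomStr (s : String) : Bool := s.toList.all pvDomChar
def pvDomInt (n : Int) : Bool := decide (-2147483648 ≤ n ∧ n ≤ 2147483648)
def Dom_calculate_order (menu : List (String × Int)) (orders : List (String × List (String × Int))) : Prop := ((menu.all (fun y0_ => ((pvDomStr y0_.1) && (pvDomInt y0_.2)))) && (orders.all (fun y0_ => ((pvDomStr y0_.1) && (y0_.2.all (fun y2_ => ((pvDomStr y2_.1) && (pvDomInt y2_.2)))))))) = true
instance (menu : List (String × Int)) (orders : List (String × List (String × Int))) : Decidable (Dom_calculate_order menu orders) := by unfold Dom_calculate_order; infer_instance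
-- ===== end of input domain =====

-- B inverts the inner traversal: it walks the menu and looks each dish up in the table's order (items.get), instead of walking the ordered items and testing menu membership; same return value on dict-shaped (duplicate-free) inputs.


-- ===== PORT A =====
def calculate_order (menu : List (String × Int)) (orders : List (String × List (String × Int))) : (List (String × Int)) × Int :=
  let menuD := PySem.Dict.mk menu
  let r := orders.foldl
    (fun (st : PySem.Dict String Int × Int) tb =>
      -- total = 0; for item, qty in items.items(): if item in menu: total += menu[item] * qty
      let total := tb.2.foldl
        (fun t iq => if menuD.contains iq.1 then t + menuD.getD iq.1 0 * iq.2 else t) 0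
      -- table_totals[table] = total; grand_total += total
      (st.1.insert tb.1 total, st.2 + total))
    (PySem.Dict.empty, 0)
  (r.1.items, r.2)

-- ===== PORT B =====
-- sum(price * items.get(item, 0) for item, price in menu.items())
def pvMenuTotal (menu : PySem.Dict String Int) (items : PySem.Dict String Int) : Int :=
  (menu.items.map (fun kp => kp.2 * items.getD kp.1 0)).sum

def calculate_order_alt (menu : List (String × Int)) (orders : List (String × List (String × Int))) : (List (String × Int)) × Int :=
  let menuD := PySem.Dict.mk menu
  -- for table, items in orders.items(): table_totals[table] = sum(price * items.get(item, 0) …)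
  let table_totals := orders.foldl
    (fun (d : PySem.Dict String Int) tb => d.insert tb.1 (pvMenuTotal menuD (PySem.Dict.mk tb.2))) PySem.Dict.empty
  -- return table_totals, sum(table_totals.values())
  (table_totals.items, table_totals.values.sum)

-- ===== PRECONDITION & SPEC =====
-- Pre_ requires all three key lists (menu keys, table keys, and each table's item keys) to be duplicate-free:
-- a Python dict cannot hold duplicate keys, so association lists with repeated keys represent no Python input of A at all.
def Pre_calculate_order (menu : List (String × Int)) (orders : List (String × List (String × Int))) : Prop :=
  (menu.map Prod.fst).Nodup ∧ (orders.map Prod.fst).Nodup ∧ ∀ tb ∈ orders, (tb.2.map Prod.fst).Nodup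
instance (menu : List (String × Int)) (orders : List (String × List (String × Int))) : Decidable (Pre_calculate_order menu orders) := by unfold Pre_calculate_order; infer_instance

def pvWitness_calculate_order : (List (String × Int)) × (List (String × List (String × Int))) :=
  ([("a", 3), ("b", 5)], [("t1", [("a", 2), ("x", 9)]), ("t2", [("b", 1)])])

def Spec_calculate_order (menu : List (String × Int)) (orders : List (String × List (String × Int))) (out : (List (String × Int)) × Int) : Prop := out = calculate_order_alt menu orders
instance (menu : List (String × Int)) (orders : List (String × List (String × Int))) (out : (List (String × Int)) × Int) : Decidable (Spec_calculate_order menu orders out) := by unfold Spec_calculate_order; infer_instance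

-- ===== CLAIM (what is proved, stated in full; the proofs are below) =====
def Claim_equal_calculate_order : Prop := ∀ (menu : List (String × Int)) (orders : List (String × List (String × Int))), Dom_calculate_order menu orders → Pre_calculate_order menu orders → Spec_calculate_order menu orders (calculate_order menu orders)

-- ===== LEMMAS AND PROOFS =====

-- the first-match lookup a Dict built from an assoc list performs
def pvLk (l : List (String × Int)) (k : String) : Int := (PySem.Dict.mk l).getD k 0

theorem pvLk_nil (k : String) : pvLk [] k = 0 := rfl

theorem pvLk_cons (k : String) (v : Int) (rest : List (String × Int)) (x : String) :
    pvLk ((k, v) :: rest) x = if k = x then v else pvLk rest x := by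
  simp [pvLk, PySem.Dict.getD_eq_get?_getD, PySem.Dict.get?_mk_cons]
  split_ifs <;> rfl

theorem pvLk_of_not_contains (l : List (String × Int)) (k : String)
    (h : ¬ (PySem.Dict.mk l).contains k = true) : pvLk l k = 0 := by
  unfold pvLk
  exact PySem.Dict.getD_of_not_contains _ _ (Bool.eq_false_iff.mpr h)

theorem pvLk_of_not_mem (l : List (String × Int)) (k : String) (h : k ∉ l.map Prod.fst) :
    pvLk l k = 0 := by
  apply pvLk_of_not_contains
  rw [PySem.Dict.contains_mk]
  simp only [List.any_eq_true, beq_iff_eq, not_exists, not_and]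
  rintro ⟨a, b⟩ hm he
  exact h (List.mem_map.2 ⟨(a, b), hm, he⟩)

-- A's guarded accumulation equals the unguarded sum over the items (a missed dish contributes 0 either way).
theorem pvInner (menu : List (String × Int)) (items : List (String × Int)) (t0 : Int) :
    items.foldl (fun t iq => if (PySem.Dict.mk menu).contains iq.1 then t + (PySem.Dict.mk menu).getD iq.1 0 * iq.2 else t) t0
      = t0 + (items.map (fun iq => pvLk menu iq.1 * iq.2)).sum := by
  induction items generalizing t0 with
  | nil => simp
  | cons p rest ih =>
      simp only [List.foldl_cons, List.map_cons, List.sum_cons]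
      by_cases h : (PySem.Dict.mk menu).contains p.1
      · rw [if_pos h, ih]; simp [pvLk]; ring
      · rw [if_neg h, ih, pvLk_of_not_contains menu p.1 h]; ring

-- one key against a duplicate-free list: the 0/1-hit sum is the first-match lookup
theorem pvHit (B : List (String × Int)) (k : String) (v : Int) (hB : (B.map Prod.fst).Nodup) :
    (B.map (fun kp => if kp.1 = k then kp.2 * v else 0)).sum = pvLk B k * v := by
  induction B with
  | nil => simp [pvLk_nil]
  | cons q rest ih =>
      rcases q with ⟨k', w⟩
      simp only [List.map_cons, List.sum_cons]
      rw [pvLk_cons]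
      by_cases h : k' = k
      · have hz : (rest.map (fun kp => if kp.1 = k then kp.2 * v else 0)).sum = 0 := by
          apply List.sum_eq_zero
          intro x hx
          obtain ⟨kp, hm, rfl⟩ := List.mem_map.1 hx
          have hne : kp.1 ≠ k := by
            intro he
            exact (List.nodup_cons.1 hB).1 (List.mem_map.2 ⟨kp, hm, he.trans h.symm⟩)
          simp [hne]
        simp [h, hz]
      · have h' : ¬ (k' = k) := h
        simp only [if_neg (fun he : (k', w).1 = k => h he), zero_add]
        exact ih (List.nodup_cons.1 hB).2

-- THE SUM SWAP: items-driven sum = menu-driven sum, on duplicate-free key lists.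
theorem pvSwap (A B : List (String × Int)) (hA : (A.map Prod.fst).Nodup) (hB : (B.map Prod.fst).Nodup) :
    (A.map (fun iq => pvLk B iq.1 * iq.2)).sum = (B.map (fun kp => kp.2 * pvLk A kp.1)).sum := by
  induction A with
  | nil =>
      symm
      simp only [List.map_nil, List.sum_nil]
      apply List.sum_eq_zero
      intro x hx
      obtain ⟨kp, _, rfl⟩ := List.mem_map.1 hx
      simp [pvLk_nil]
  | cons p A' ih =>
      rcases p with ⟨k, v⟩
      simp only [List.map_cons, List.sum_cons]
      have hk : k ∉ A'.map Prod.fst := (List.nodup_cons.1 hA).1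
      have hsplit : ∀ kp : String × Int, kp ∈ B →
          kp.2 * pvLk ((k, v) :: A') kp.1
            = (if kp.1 = k then kp.2 * v else 0) + kp.2 * pvLk A' kp.1 := by
        intro kp _
        rw [pvLk_cons]
        by_cases h : kp.1 = k
        · rw [if_pos h.symm, if_pos h, h, pvLk_of_not_mem A' k hk]; ring
        · rw [if_neg (fun he : k = kp.1 => h he.symm), if_neg h, zero_add]
      have hc : (B.map (fun kp => kp.2 * pvLk ((k, v) :: A') kp.1)).sum
          = pvLk B k * v + (A'.map (fun iq => pvLk B iq.1 * iq.2)).sum := by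
        calc (B.map (fun kp => kp.2 * pvLk ((k, v) :: A') kp.1)).sum
            = (B.map (fun kp => (if kp.1 = k then kp.2 * v else 0) + kp.2 * pvLk A' kp.1)).sum := by
              exact congrArg List.sum (List.map_congr_left hsplit)
          _ = (B.map (fun kp => if kp.1 = k then kp.2 * v else 0)).sum
                + (B.map (fun kp => kp.2 * pvLk A' kp.1)).sum := by
              rw [← List.sum_map_add]
          _ = pvLk B k * v + (A'.map (fun iq => pvLk B iq.1 * iq.2)).sum := by
              rw [pvHit B k v hB, ih (List.nodup_cons.1 hA).2]
      exact hc.symm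

-- per-table: A's inner loop total = B's menu-driven total
theorem pvTableEq (menu : List (String × Int)) (items : List (String × Int))
    (hm : (menu.map Prod.fst).Nodup) (hi : (items.map Prod.fst).Nodup) :
    items.foldl (fun t iq => if (PySem.Dict.mk menu).contains iq.1 then t + (PySem.Dict.mk menu).getD iq.1 0 * iq.2 else t) 0
      = pvMenuTotal (PySem.Dict.mk menu) (PySem.Dict.mk items) := by
  rw [pvInner, zero_add, pvSwap items menu hi hm]
  rfl

-- A's single loop, with per-table totals abstracted out, equals dict-building fold + sum of totals.
theorem pvOuter (T : String × List (String × Int) → Int) (orders : List (String × List (String × Int)))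
    (d : PySem.Dict String Int) (g : Int) :
    orders.foldl (fun (st : PySem.Dict String Int × Int) tb => (st.1.insert tb.1 (T tb), st.2 + T tb)) (d, g)
      = (orders.foldl (fun d tb => d.insert tb.1 (T tb)) d, g + (orders.map T).sum) := by
  induction orders generalizing d g with
  | nil => simp
  | cons o rest ih =>
      simp only [List.foldl_cons, List.map_cons, List.sum_cons]
      rw [ih]; ring_nf

theorem pvItems (T : String × List (String × Int) → Int) (orders : List (String × List (String × Int)))
    (h : (orders.map Prod.fst).Nodup) :
    (orders.foldl (fun (d : PySem.Dict String Int) tb => d.insert tb.1 (T tb)) PySem.Dict.empty).items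
      = orders.map (fun tb => (tb.1, T tb)) := by
  rw [PySem.Dict.items_foldl_insert_fresh (k := Prod.fst) (v := T)
      (d := PySem.Dict.empty) (l := orders) (by simp [PySem.Dict.contains_empty]) h]
  simp [PySem.Dict.empty]

-- ===== VERDICT (by name: the statement is the Claim_ definition above) =====
theorem calculate_order_spec : Claim_equal_calculate_order := by
  intro menu orders _ hpre
  obtain ⟨hm, ho, hi⟩ := hpre
  unfold Spec_calculate_order calculate_order calculate_order_alt
  simp only []
  have hcong : orders.foldl
      (fun (st : PySem.Dict String Int × Int) tb =>
        let total := tb.2.foldl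
          (fun t iq => if (PySem.Dict.mk menu).contains iq.1 then t + (PySem.Dict.mk menu).getD iq.1 0 * iq.2 else t) 0
        (st.1.insert tb.1 total, st.2 + total)) (PySem.Dict.empty, 0)
      = orders.foldl
      (fun (st : PySem.Dict String Int × Int) tb =>
        (st.1.insert tb.1 (pvMenuTotal (PySem.Dict.mk menu) (PySem.Dict.mk tb.2)),
         st.2 + pvMenuTotal (PySem.Dict.mk menu) (PySem.Dict.mk tb.2))) (PySem.Dict.empty, 0) := by
    apply PySem.List.foldl_congr_mem
    intro acc tb htb
    simp only []
    rw [pvTableEq menu tb.2 hm (hi tb htb)]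
  rw [hcong, pvOuter (fun tb => pvMenuTotal (PySem.Dict.mk menu) (PySem.Dict.mk tb.2))]
  have hitems := pvItems (fun tb => pvMenuTotal (PySem.Dict.mk menu) (PySem.Dict.mk tb.2)) orders ho
  refine Prod.ext ?_ ?_
  · simp [hitems]
  · simp only [PySem.Dict.values, hitems]
    simp [Function.comp_def]
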